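-- pv_equiv track=rewrite | github.com/applictester/python-projects | fun-numbers/all-numbers-in-range-mod.py | is_lyndon
-- ===== SOURCE A (Python) =====
-- def count_digits(n):
--     # Calculate the number of digits without converting to a string
--     num_digits = 0
--     while n > 0:
--         n //= 10
--         num_digits += 1
--     return num_digits
--
-- def get_digits(n):
--     digits = []
--     while n > 0:
--         digits.append(n % 10)
--         n //= 10
--     digits.reverse()
--     return digits
--
-- def is_lyndon(n):
--     # Check if the number has an even number of digits
--     if count_digits(n) % 2 != 0:
--         return False
--     # Split the number into two halves without using strings
--     digits = get_digits(n)
--     mid = len(digits) // 2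
--     first_half = 0
--     second_half = 0
--     for i in range(mid):
--         first_half = first_half * 10 + digits[i]
--     for i in range(mid, len(digits)):
--         second_half = second_half * 10 + digits[i]
--     # Check if the sum of squares of the halves equals the number
--     return first_half**2 + second_half**2 == n
-- ===== SOURCE B (Python) =====
-- def count_digits(n):
--     # Calculate the number of digits without converting to a string
--     num_digits = 0
--     while n > 0:
--         n //= 10
--         num_digits += 1
--     return num_digits
--
-- def is_lyndon(n):
--     d = count_digits(n)
--     if d % 2 != 0:
--         return False
--     # Split the number directly with one division/modulo by a power of ten
--     half = 10 ** (d // 2)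
--     return (n // half) ** 2 + (n % half) ** 2 == n
-- ===== Notes on version B (the rewrite author's own statement) =====
-- stated objective: simpler
-- what changed: Drops the get_digits list and both digit-reconstruction loops: B splits the number arithmetically with one floor division and one modulo by a power of ten whose exponent is half the digit count.
import Mathlib
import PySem

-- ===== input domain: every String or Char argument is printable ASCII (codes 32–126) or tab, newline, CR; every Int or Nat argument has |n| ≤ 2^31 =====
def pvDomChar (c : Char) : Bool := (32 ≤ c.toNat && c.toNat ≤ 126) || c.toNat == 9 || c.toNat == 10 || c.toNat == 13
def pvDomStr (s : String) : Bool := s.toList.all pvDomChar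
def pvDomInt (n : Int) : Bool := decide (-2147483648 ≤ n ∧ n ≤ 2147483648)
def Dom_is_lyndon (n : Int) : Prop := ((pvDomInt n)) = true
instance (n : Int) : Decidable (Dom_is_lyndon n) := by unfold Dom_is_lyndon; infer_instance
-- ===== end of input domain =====

-- B drops A's digit list and both digit-reconstruction loops, splitting the number
-- with one floor division and one modulo by a power of ten (objective: simpler).

-- termination measure for the `while n > 0: n //= 10` loops (cited by the ports' decreasing_by)
theorem pvFloordiv10_toNat_lt {n : Int} (h : 0 < n) :
    (PySem.Int.floordiv n 10).toNat < n.toNat := by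
  rw [PySem.Int.floordiv_eq_ediv_of_pos (by omega)]
  have h1 : n / 10 < n := by
    have := Int.ediv_lt_iff_lt_mul (a := n) (b := n) (c := 10) (by omega)
    omega
  have h2 : 0 ≤ n / 10 := Int.ediv_nonneg (le_of_lt h) (by omega)
  omega

-- ===== PORT A =====
def count_digits (n : Int) : Int :=
  if h : 0 < n then count_digits (PySem.Int.floordiv n 10) + 1 else 0
termination_by n.toNat
decreasing_by exact pvFloordiv10_toNat_lt h

def get_digits_loop (n : Int) (digits : List Int) : List Int :=
  if h : 0 < n then get_digits_loop (PySem.Int.floordiv n 10) (digits ++ [PySem.Int.mod n 10])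
  else digits
termination_by n.toNat
decreasing_by exact pvFloordiv10_toNat_lt h

def get_digits (n : Int) : List Int := (get_digits_loop n []).reverse

def is_lyndon (n : Int) : Bool :=
  if PySem.Int.mod (count_digits n) 2 ≠ 0 then false
  else
    let digits := get_digits n
    let mid : Int := PySem.Int.floordiv (digits.length : Int) 2
    let first_half : Int :=
      (PySem.List.pyRange 0 mid 1).foldl (fun a i => a * 10 + PySem.List.pyGetD digits i 0) 0
    let second_half : Int :=
      (PySem.List.pyRange mid (digits.length : Int) 1).foldl
        (fun a i => a * 10 + PySem.List.pyGetD digits i 0) 0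
    decide (first_half ^ 2 + second_half ^ 2 = n)

-- ===== PORT B =====
-- B keeps A's count_digits loop verbatim, so its port shares the helper `count_digits`.
def is_lyndon_alt (n : Int) : Bool :=
  let d := count_digits n
  if PySem.Int.mod d 2 ≠ 0 then false
  else
    -- 10 ** (d // 2): d is always ≥ 0, so the `.toNat` on the exponent is exact
    let half : Int := 10 ^ (PySem.Int.floordiv d 2).toNat
    decide ((PySem.Int.floordiv n half) ^ 2 + (PySem.Int.mod n half) ^ 2 = n)

-- ===== PRECONDITION & SPEC =====
def Spec_is_lyndon (n : Int) (out : Bool) : Prop := out = is_lyndon_alt n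
instance (n : Int) (out : Bool) : Decidable (Spec_is_lyndon n out) := by unfold Spec_is_lyndon; infer_instance

-- ===== CLAIM (what is proved, stated in full; the proofs are below) =====
def Claim_equal_is_lyndon : Prop := ∀ (n : Int), Dom_is_lyndon n → Spec_is_lyndon n (is_lyndon n)

-- ===== LEMMAS AND PROOFS =====

-- proof-side view of A's digit list, least-significant digit first
def pvDl (n : Int) : List Int :=
  if h : 0 < n then PySem.Int.mod n 10 :: pvDl (PySem.Int.floordiv n 10) else []
termination_by n.toNat
decreasing_by exact pvFloordiv10_toNat_lt h

theorem pvDl_pos {n : Int} (h : 0 < n) : pvDl n = n % 10 :: pvDl (n / 10) := by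
  rw [pvDl, dif_pos h, PySem.Int.mod_eq_emod_of_pos (by omega),
    PySem.Int.floordiv_eq_ediv_of_pos (by omega)]

theorem pvDl_nonpos {n : Int} (h : ¬ 0 < n) : pvDl n = [] := by
  rw [pvDl, dif_neg h]

theorem count_digits_nonpos {n : Int} (h : ¬ 0 < n) : count_digits n = 0 := by
  rw [count_digits, dif_neg h]

theorem count_digits_nonneg (n : Int) : 0 ≤ count_digits n := by
  fun_induction count_digits n with
  | case1 n h ih => omega
  | case2 n h => omega

theorem get_digits_loop_eq (n : Int) (acc : List Int) :
    get_digits_loop n acc = acc ++ pvDl n := by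
  fun_induction get_digits_loop n acc with
  | case1 n acc h ih =>
      conv_rhs => rw [pvDl, dif_pos h]
      rw [ih, List.append_assoc]
      rfl
  | case2 n acc h =>
      rw [pvDl, dif_neg h, List.append_nil]

theorem get_digits_eq (n : Int) : get_digits n = (pvDl n).reverse := by
  rw [get_digits, get_digits_loop_eq, List.nil_append]

theorem pvDl_length (n : Int) : ((pvDl n).length : Int) = count_digits n := by
  fun_induction pvDl n with
  | case1 n h ih =>
      conv_rhs => rw [count_digits, dif_pos h]
      rw [List.length_cons]
      push_cast
      omega
  | case2 n h =>
      rw [count_digits, dif_neg h]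
      rfl

-- value of the whole digit list, most significant digit first (Horner fold)
theorem pvDl_foldl_full (n : Int) : 0 ≤ n →
    (pvDl n).reverse.foldl (fun a x => a * 10 + x) 0 = n := by
  fun_induction pvDl n with
  | case1 n h1 ih =>
      intro h
      have hfd : PySem.Int.floordiv n 10 = n / 10 :=
        PySem.Int.floordiv_eq_ediv_of_pos (by omega)
      have hmd : PySem.Int.mod n 10 = n % 10 :=
        PySem.Int.mod_eq_emod_of_pos (by omega)
      rw [hfd] at ih
      have hq : 0 ≤ n / 10 := Int.ediv_nonneg (by omega) (by omega)
      rw [List.reverse_cons, List.foldl_append, hfd, hmd, ih hq]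
      have hsplit : 10 * (n / 10) + n % 10 = n := Int.mul_ediv_add_emod n 10
      simp only [List.foldl_cons, List.foldl_nil]
      omega
  | case2 n h1 =>
      intro h
      simp only [List.reverse_nil, List.foldl_nil]
      omega

theorem pvDl_foldl_take (k : Nat) :
    ∀ n : Int, 0 ≤ n →
      ((pvDl n).take k).reverse.foldl (fun a x => a * 10 + x) 0 = n % 10 ^ k := by
  induction k with
  | zero =>
      intro n h
      simp
  | succ k ih =>
      intro n h
      by_cases hn : 0 < n
      · have hq : 0 ≤ n / 10 := Int.ediv_nonneg (by omega) (by omega)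
        rw [pvDl_pos hn, List.take_succ_cons, List.reverse_cons, List.foldl_append,
          ih (n / 10) hq]
        simp only [List.foldl_cons, List.foldl_nil]
        -- arithmetic: (n/10 % 10^k) * 10 + n % 10 = n % 10^(k+1)
        set P : Int := 10 ^ k with hPdef
        have hP : (0:Int) < P := by positivity
        set q : Int := n / 10 with hqdef
        have hsplit : 10 * q + n % 10 = n := Int.mul_ediv_add_emod n 10
        have hmod1 : 0 ≤ n % 10 := Int.emod_nonneg n (by omega)
        have hmod2 : n % 10 < 10 := Int.emod_lt_of_pos n (by omega)
        have hq2 : P * (q / P) + q % P = q := Int.mul_ediv_add_emod q P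
        have hqm1 : 0 ≤ q % P := Int.emod_nonneg q (by omega)
        have hqm2 : q % P < P := Int.emod_lt_of_pos q hP
        have hrepr : n = (q % P * 10 + n % 10) + (P * 10) * (q / P) := by
          linear_combination -(10 * hq2 + hsplit)
        have hbound : q % P * 10 + n % 10 < P * 10 := by nlinarith
        have hkey : n % (P * 10) = q % P * 10 + n % 10 := by
          conv_lhs => rw [hrepr]
          rw [Int.add_mul_emod_self_left,
            Int.emod_eq_of_lt (by nlinarith) hbound]
        rw [pow_succ, hkey]
      · have hn0 : n = 0 := by omega
        subst hn0
        simp [pvDl_nonpos hn]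

theorem pvDl_foldl_drop (k : Nat) :
    ∀ n : Int, 0 ≤ n →
      ((pvDl n).drop k).reverse.foldl (fun a x => a * 10 + x) 0 = n / 10 ^ k := by
  induction k with
  | zero =>
      intro n h
      simpa using pvDl_foldl_full n h
  | succ k ih =>
      intro n h
      by_cases hn : 0 < n
      · have hq : 0 ≤ n / 10 := Int.ediv_nonneg (by omega) (by omega)
        rw [pvDl_pos hn, List.drop_succ_cons, ih (n / 10) hq,
          Int.ediv_ediv_of_nonneg (by omega), ← pow_succ']
      · have hn0 : n = 0 := by omega
        subst hn0
        simp [pvDl_nonpos hn]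

-- the first loop `for i in range(mid)` reads exactly the first `mid` entries
theorem pvFoldRangeTake (xs : List Int) (m : Nat) (hm : m ≤ xs.length) :
    (PySem.List.pyRange 0 (m : Int) 1).foldl
        (fun a i => a * 10 + PySem.List.pyGetD xs i 0) 0
      = (xs.take m).foldl (fun a x => a * 10 + x) 0 := by
  induction m with
  | zero =>
      rw [PySem.List.pyRange_one_eq_nil (by simp)]
      simp
  | succ m ih =>
      have hm' : m ≤ xs.length := by omega
      have hlt : m < xs.length := by omega
      have hrange : PySem.List.pyRange 0 ((m : Int) + 1) 1
          = PySem.List.pyRange 0 (m : Int) 1 ++ [(m : Int)] :=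
        PySem.List.pyRange_one_succ_right (by positivity)
      have hcast : ((m + 1 : Nat) : Int) = (m : Int) + 1 := by push_cast; ring
      rw [hcast, hrange, List.foldl_append, ih hm', List.take_add_one,
        List.foldl_append]
      simp [PySem.List.pyGetD_natCast, List.getElem?_eq_getElem hlt,
        List.getD_eq_getElem?_getD]

-- core equivalence, no precondition
theorem pv_main (n : Int) : is_lyndon n = is_lyndon_alt n := by
  simp only [is_lyndon, is_lyndon_alt]
  by_cases hodd : PySem.Int.mod (count_digits n) 2 ≠ 0
  · rw [if_pos hodd, if_pos hodd]
  · rw [if_neg hodd, if_neg hodd]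
    by_cases hn : 0 < n
    · -- n > 0: both sides compute (n / 10^m)^2 + (n % 10^m)^2 == n
      have hd0 : 0 ≤ count_digits n := count_digits_nonneg n
      obtain ⟨dn, hdn⟩ : ∃ dn : Nat, count_digits n = (dn : Int) :=
        ⟨(count_digits n).toNat, (Int.toNat_of_nonneg hd0).symm⟩
      have heven : (2:Int) ∣ count_digits n :=
        (PySem.Int.mod_eq_zero_iff_dvd _ _).mp (not_not.mp hodd)
      have heven' : 2 ∣ dn := by
        rw [hdn] at heven
        exact_mod_cast heven
      set m : Nat := dn / 2 with hmdef
      have hm2 : dn = 2 * m := by omega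
      have hdig : get_digits n = (pvDl n).reverse := get_digits_eq n
      have hlen : (pvDl n).length = dn := by
        have := pvDl_length n
        rw [hdn] at this
        exact_mod_cast this
      have hlenr : (get_digits n).length = dn := by
        rw [hdig, List.length_reverse, hlen]
      have hmid : PySem.Int.floordiv ((get_digits n).length : Int) 2 = (m : Int) := by
        rw [hlenr, PySem.Int.floordiv_eq_ediv_of_pos (by omega)]
        omega
      have hfirst :
          (PySem.List.pyRange 0 (m : Int) 1).foldl
              (fun a i => a * 10 + PySem.List.pyGetD (get_digits n) i 0) 0
            = n / 10 ^ m := by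
        rw [pvFoldRangeTake (get_digits n) m (by omega), hdig, List.take_reverse,
          hlen, show dn - m = m by omega, pvDl_foldl_drop m n (by omega)]
      have hsecond :
          (PySem.List.pyRange (m : Int) ((get_digits n).length : Int) 1).foldl
              (fun a i => a * 10 + PySem.List.pyGetD (get_digits n) i 0) 0
            = n % 10 ^ m := by
        rw [PySem.List.foldl_pyRange_pyGetD' (get_digits n) 0
          (fun a x => a * 10 + x) 0 (a := (m : Int)) (by positivity)]
        rw [Int.toNat_natCast, hdig, List.drop_reverse, hlen,
          show dn - m = m by omega, pvDl_foldl_take m n (by omega)]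
      have hhalfexp : (PySem.Int.floordiv (count_digits n) 2).toNat = m := by
        rw [hdn, PySem.Int.floordiv_eq_ediv_of_pos (by omega)]
        omega
      have hP : (0:Int) < 10 ^ m := by positivity
      rw [hmid, hfirst, hsecond, hhalfexp,
        PySem.Int.floordiv_eq_ediv_of_pos hP, PySem.Int.mod_eq_emod_of_pos hP]
    · -- n ≤ 0: A compares 0 with n, B compares n² with n; both hold only at n = 0
      have hcd : count_digits n = 0 := count_digits_nonpos hn
      have hdl : pvDl n = [] := pvDl_nonpos hn
      rw [get_digits_eq, hdl, hcd]
      simp only [List.reverse_nil, List.length_nil, Nat.cast_zero]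
      have hfd0 : PySem.Int.floordiv (0:Int) 2 = 0 := by
        rw [PySem.Int.floordiv_eq_ediv_of_pos (by omega)]
        rfl
      rw [hfd0]
      simp only [Int.toNat_zero, pow_zero]
      rw [PySem.List.pyRange_one_eq_nil (by omega),
        PySem.Int.floordiv_eq_ediv_of_pos (b := 1) (by omega),
        PySem.Int.mod_eq_emod_of_pos (b := 1) (by omega)]
      simp only [List.foldl_nil, Int.ediv_one, Int.emod_one]
      by_cases hz : n = 0
      · subst hz; rfl
      · have hneg : n < 0 := by omega
        have h1 : ¬ ((0:Int) ^ 2 + 0 ^ 2 = n) := by intro hc; norm_num at hc; omega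
        have h2 : ¬ (n ^ 2 + 0 ^ 2 = n) := by intro hc; nlinarith
        exact decide_eq_decide.mpr (iff_of_false h1 h2)

-- ===== VERDICT (by name: the statement is the Claim_ definition above) =====
theorem is_lyndon_spec : Claim_equal_is_lyndon := by
  intro n _
  exact pv_main n
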